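-- pv_equiv track=rewrite | github.com/danoctua/tradeshows-scrape | exhibitions/spiders/home_textiles_today_spider.py | get_item_index
-- ===== SOURCE A (Python) =====
-- from typing import List, Optional
--
-- def get_item_index(values: List[str], key: str) -> Optional[int]:
--     values = [value.strip() for value in values]
--     try:
--         key_index = values.index(key)
--         for i, item in enumerate(values[key_index + 1 :], start=1):
--             if item.strip():
--                 return key_index + i
--     except ValueError:
--         pass
--     return None
-- ===== SOURCE B (Python) =====
-- from typing import List, Optional
--
-- def get_item_index(values: List[str], key: str) -> Optional[int]:
--     # Backwards scan: walk the list from the end, maintaining `nxt`, the index of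
--     # the first non-empty (stripped) element of the suffix strictly after the
--     # current position.  Whenever the current stripped value equals the key we
--     # record `nxt` as the answer; since lower indices are processed later, the
--     # leftmost occurrence of the key overwrites all others last, matching A's
--     # first-occurrence semantics.
--     ans = None
--     nxt = None
--     for i in range(len(values) - 1, -1, -1):
--         v = values[i].strip()
--         if v == key:
--             ans = nxt
--         if v:
--             nxt = i
--     return ans
-- ===== Notes on version B (the rewrite author's own statement) =====
-- stated objective: alternative
-- what changed: Replaced A's forward .index()-then-scan-the-tail two-phase structure by a single backwards traversal that maintains, for each position, the index of the first non-empty element of the suffix after it, recording it whenever the key is seen (the leftmost key wins because it is processed last).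
import Mathlib
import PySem

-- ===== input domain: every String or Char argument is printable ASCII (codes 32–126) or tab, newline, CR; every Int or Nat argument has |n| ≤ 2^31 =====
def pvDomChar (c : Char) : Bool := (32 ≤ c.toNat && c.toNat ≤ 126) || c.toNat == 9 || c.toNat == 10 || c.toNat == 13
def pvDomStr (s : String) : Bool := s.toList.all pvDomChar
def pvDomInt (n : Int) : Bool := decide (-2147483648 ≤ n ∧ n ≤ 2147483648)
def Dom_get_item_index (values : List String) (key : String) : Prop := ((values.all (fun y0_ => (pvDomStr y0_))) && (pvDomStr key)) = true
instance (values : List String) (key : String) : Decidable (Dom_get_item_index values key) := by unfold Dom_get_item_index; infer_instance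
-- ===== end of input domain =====

-- B replaces A's forward .index()-then-scan-the-tail two-phase structure by one backwards
-- traversal maintaining the first non-empty index of the suffix (objective: alternative).

-- ===== PORT A =====
-- the 'for i, item in enumerate(values[key_index+1:], start=1): if item.strip(): return key_index + i' loop
def pvAScan (l : List String) (kIdx : Int) (i : Int) : Option Int :=
  match l with
  | [] => none
  | item :: rest =>
    if PySem.Str.strip item ≠ "" then some (kIdx + i) else pvAScan rest kIdx (i + 1)

def get_item_index (values : List String) (key : String) : Option Int :=
  let vs := values.map PySem.Str.strip
  match PySem.List.index? vs key with
  | some k => pvAScan (PySem.List.slice vs (some ((k : Int) + 1)) none) (k : Int) 1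
  | none => none

-- ===== PORT B =====
-- the 'for i in range(len(values)-1, -1, -1)' loop: iterating backwards over the indices is
-- transcribed as structural recursion that processes the tail (the higher indices) first;
-- the pair carries the loop state (ans, nxt) as it stands after processing index i.
def pvBRev (key : String) (l : List String) (i : Int) : Option Int × Option Int :=
  match l with
  | [] => (none, none)
  | v :: rest =>
    let p := pvBRev key rest (i + 1)
    let s := PySem.Str.strip v
    (if s = key then p.2 else p.1, if s ≠ "" then some i else p.2)

def get_item_index_alt (values : List String) (key : String) : Option Int :=
  (pvBRev key values 0).1

-- ===== PRECONDITION & SPEC =====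
def Spec_get_item_index (values : List String) (key : String) (out : Option Int) : Prop := out = get_item_index_alt values key
instance (values : List String) (key : String) (out : Option Int) : Decidable (Spec_get_item_index values key out) := by unfold Spec_get_item_index; infer_instance

-- ===== CLAIM (what is proved, stated in full; the proofs are below) =====
def Claim_equal_get_item_index : Prop := ∀ (values : List String) (key : String), Dom_get_item_index values key → Spec_get_item_index values key (get_item_index values key)

-- ===== LEMMAS AND PROOFS =====

-- dropWhile leaves an already-clean list's prefixes alone
theorem pv_dropWhile_prefix {p : Char → Bool} {x x' : List Char}
    (hx : x.dropWhile p = x) (hpre : x' <+: x) : x'.dropWhile p = x' := by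
  cases x' with
  | nil => simp
  | cons a t =>
    rcases hpre with ⟨r, hr⟩
    subst hr
    rw [List.cons_append] at hx
    rw [List.dropWhile_cons] at hx ⊢
    by_cases hpa : p a = true
    · exfalso
      rw [if_pos hpa] at hx
      have hle := List.length_dropWhile_le p (t ++ r)
      have hlen := congrArg List.length hx
      rw [List.length_cons] at hlen
      omega
    · rw [if_neg hpa]

theorem pv_rstrip_prefix (x : List Char) : PySem.Chars.rstrip x <+: x := by
  have h : (PySem.Chars.rstrip x).reverse <:+ x.reverse := by
    simp [PySem.Chars.rstrip]
    exact List.dropWhile_suffix _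
  exact List.reverse_suffix.mp h

theorem pv_chars_strip_idem (cs : List Char) :
    PySem.Chars.strip (PySem.Chars.strip cs) = PySem.Chars.strip cs := by
  simp only [PySem.Chars.strip, PySem.Chars.lstrip, PySem.Chars.rstrip]
  have hlid : (cs.dropWhile PySem.Chars.isspace).dropWhile PySem.Chars.isspace
      = cs.dropWhile PySem.Chars.isspace := List.dropWhile_idempotent _ _
  have hy := pv_dropWhile_prefix hlid (pv_rstrip_prefix (cs.dropWhile PySem.Chars.isspace))
  simp only [PySem.Chars.rstrip] at hy
  rw [hy, List.reverse_reverse, List.dropWhile_idempotent]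

theorem pv_strip_idem (s : String) : PySem.Str.strip (PySem.Str.strip s) = PySem.Str.strip s := by
  have h : (PySem.Str.strip (PySem.Str.strip s)).toList = (PySem.Str.strip s).toList := by
    rw [PySem.Str.toList_strip, PySem.Str.toList_strip, pv_chars_strip_idem]
  exact String.toList_inj.mp h

-- A's forward scan over the stripped tail computes exactly B's `nxt` component
theorem pv_ascan_eq_snd (key : String) (l : List String) (kIdx j : Int) :
    pvAScan (l.map PySem.Str.strip) kIdx j = (pvBRev key l (kIdx + j)).2 := by
  induction l generalizing j with
  | nil => rfl
  | cons v rest ih =>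
    simp only [List.map_cons, pvAScan, pvBRev, pv_strip_idem]
    by_cases hv : PySem.Str.strip v = ""
    · simp only [hv, ne_eq, not_true_eq_false, if_false]
      have : kIdx + j + 1 = kIdx + (j + 1) := by ring
      rw [this]; exact ih (j + 1)
    · simp [hv]

-- B's `ans` component, characterised by the first occurrence of key in the stripped list
theorem pv_brev_fst (key : String) (l : List String) (i : Int) :
    (pvBRev key l i).1 =
      (match PySem.List.index? (l.map PySem.Str.strip) key with
       | none => none
       | some k => (pvBRev key (l.drop (k + 1)) (i + (k : Int) + 1)).2) := by
  induction l generalizing i with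
  | nil => rfl
  | cons v rest ih =>
    simp only [List.map_cons]
    by_cases hv : PySem.Str.strip v = key
    · rw [hv, PySem.List.index?_cons_self]
      simp [pvBRev, hv]
    · rw [PySem.List.index?_cons_of_ne _ hv]
      have hstep : (pvBRev key (v :: rest) i).1 = (pvBRev key rest (i + 1)).1 := by
        simp [pvBRev, hv]
      rw [hstep, ih (i + 1)]
      cases hr : PySem.List.index? (rest.map PySem.Str.strip) key with
      | none => rfl
      | some j =>
        simp only [Option.map_some]
        have h1 : (v :: rest).drop (j + 1 + 1) = rest.drop (j + 1) := by simp
        have h2 : i + 1 + (j : Int) + 1 = i + ((j + 1 : Nat) : Int) + 1 := by push_cast; ring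
        rw [h1, h2]

-- ===== VERDICT (by name: the statement is the Claim_ definition above) =====
theorem get_item_index_spec : Claim_equal_get_item_index := by
  intro values key _
  simp only [Spec_get_item_index, get_item_index, get_item_index_alt]
  rw [pv_brev_fst]
  cases h : PySem.List.index? (values.map PySem.Str.strip) key with
  | none => rfl
  | some k =>
    simp only
    have hc : ((k : Int) + 1) = ((k + 1 : Nat) : Int) := by push_cast; ring
    rw [hc, PySem.List.slice_from_natCast, ← List.map_drop]
    rw [pv_ascan_eq_snd key _ (k : Int) 1]
    ring_nf
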